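-- pv_equiv track=rewrite | github.com/slynch8/10x | PythonScripts/CMakeIntegration/CMakeIntegration.py | macro_expansion_n10x
-- ===== SOURCE A (Python) =====
-- def macro_expansion_n10x(target_string: str, macros) -> str:
--     i = int(0)
--     # TODO: unescape strings
--     out_string = ""
--     while i < len(target_string):
--         em = i
--         if target_string[i] == "$":  # potential macro expansion
--             while em < len(target_string) and target_string[em] != ")":
--                 em += 1
--             macro_key = target_string[i : em + 1]
--             macro_value = macro_key
--             if macro_key in macros and macros[macro_key] != None:
--                 macro_value = macros[macro_key]
--             out_string += macro_value
--             # jump past macro expansion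
--             i = em + 1
--         else:
--             while em < len(target_string) and target_string[em] != "$":
--                 em += 1
--             out_string += target_string[i:em]
--             # jump past substring
--             i = em
--
--     return out_string
-- ===== SOURCE B (Python) =====
-- def macro_expansion_n10x(target_string: str, macros) -> str:
--     # Split on ')': inside each segment the first '$' (if any) starts exactly one
--     # macro token that runs to the segment's closing ')' (or to the end for the
--     # last, unterminated segment); everything else passes through unchanged.
--     segs = target_string.split(')')
--     last = len(segs) - 1
--     out = []
--     for idx, seg in enumerate(segs):
--         close = ')' if idx < last else ''
--         d = seg.find('$')
--         if d == -1:
--             out.append(seg + close)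
--         else:
--             tok = seg[d:] + close
--             v = macros.get(tok)
--             out.append(seg[:d] + (tok if v is None else v))
--     return ''.join(out)
-- ===== Notes on version B (the rewrite author's own statement) =====
-- stated objective: idiomatic
-- what changed: Replaced A's index-based while-loop with hand-scanned slices and string += by a split(')')-based pass: each segment holds at most one macro token (from its first '$' to the segment's closing ')'), looked up via dict.get, with the pieces joined at the end.
import Mathlib
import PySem

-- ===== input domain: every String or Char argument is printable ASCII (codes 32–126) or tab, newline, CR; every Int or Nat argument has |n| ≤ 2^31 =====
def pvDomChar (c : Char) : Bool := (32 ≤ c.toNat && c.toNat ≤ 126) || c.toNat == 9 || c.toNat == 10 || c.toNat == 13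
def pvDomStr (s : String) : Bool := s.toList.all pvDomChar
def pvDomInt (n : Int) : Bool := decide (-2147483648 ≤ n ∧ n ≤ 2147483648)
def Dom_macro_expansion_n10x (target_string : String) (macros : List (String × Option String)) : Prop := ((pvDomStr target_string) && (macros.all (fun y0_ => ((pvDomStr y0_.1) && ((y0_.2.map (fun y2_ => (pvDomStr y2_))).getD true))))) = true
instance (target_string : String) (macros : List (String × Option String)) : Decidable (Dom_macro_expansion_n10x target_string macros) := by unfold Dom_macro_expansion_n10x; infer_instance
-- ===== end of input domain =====

-- B rewrites A's index-scanning while-loop as a split(')')/join pass; return values proved equal (no observable side effects in either).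

-- ===== PORT A =====
-- inner `while em < len and s[em] != c: em += 1` of A (both inner loops, with c = ')' resp. '$')
def pvScanA (c : Char) (s : List Char) (em : Nat) : Nat :=
  if h : em < s.length then
    if s[em] = c then em else pvScanA c s (em + 1)
  else em
termination_by s.length - em

theorem pvScanA_ge (c : Char) (s : List Char) (em : Nat) : em ≤ pvScanA c s em := by
  induction em using pvScanA.induct c s with
  | case1 x h heq => rw [pvScanA]; simp [h, heq]
  | case2 x h heq ih => rw [pvScanA]; simp only [dif_pos h, if_neg heq]; omega
  | case3 x h => rw [pvScanA]; simp [h]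

theorem pvScanA_gt (c : Char) (s : List Char) (em : Nat) (h : em < s.length)
    (hne : s[em] ≠ c) : em + 1 ≤ pvScanA c s em := by
  rw [pvScanA]; simp only [dif_pos h, if_neg hne]; exact pvScanA_ge c s (em + 1)

-- A's outer while-loop: i is the index, out the accumulated output (strings carried as List Char, exact)
def macro_expansion_n10x_core (s : List Char) (macros : List (String × Option String))
    (i : Nat) (out : List Char) : List Char :=
  if h : i < s.length then
    if hne : s[i] = '$' then
      let em := pvScanA ')' s i
      -- macro_key = target_string[i : em+1]  (0 ≤ i ≤ em+1: Python slice = drop/take, clamped like take)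
      let key := (s.drop i).take (em + 1 - i)
      -- `macro_key in macros and macros[macro_key] != None` (dict: first-match lookup)
      let val := match macros.lookup (String.mk key) with
        | some (some v) => v.data
        | _ => key
      macro_expansion_n10x_core s macros (em + 1) (out ++ val)
    else
      let em := pvScanA '$' s i
      -- out_string += target_string[i:em]
      macro_expansion_n10x_core s macros em (out ++ (s.drop i).take (em - i))
  else out
termination_by s.length + 1 - i
decreasing_by
  · exact Nat.sub_lt_sub_left (Nat.lt_succ_of_lt h) (Nat.lt_succ_of_le (pvScanA_ge ')' s i))
  · exact Nat.sub_lt_sub_left (Nat.lt_succ_of_lt h)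
      (Nat.lt_of_lt_of_le (Nat.lt_succ_self i) (pvScanA_gt '$' s i h hne))

def macro_expansion_n10x (target_string : String) (macros : List (String × Option String)) : String :=
  String.mk (macro_expansion_n10x_core target_string.data macros 0 [])

-- ===== PORT B =====
-- Python str.split(')') : segments between the ')' separators, in order
def pvSplitParen (cs : List Char) : List (List Char) :=
  match _h : cs.dropWhile (fun x => x ≠ ')') with
  | [] => [cs.takeWhile (fun x => x ≠ ')')]
  | _ :: rest => cs.takeWhile (fun x => x ≠ ')') :: pvSplitParen rest
termination_by cs.length
decreasing_by
  have h2 := List.length_dropWhile_le (fun x => x ≠ ')') cs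
  rw [_h] at h2; simp at h2; omega

-- body of B's for-loop for one segment (close = ')' for all but the last segment)
def pvProcSeg (macros : List (String × Option String)) (close : List Char) (seg : List Char) : List Char :=
  match seg.idxOf? '$' with                 -- seg.find('$'); none ↔ -1
  | none => seg ++ close
  | some d =>
      let tok := seg.drop d ++ close
      match macros.lookup (String.mk tok) with   -- macros.get(tok); `v is None` ↔ not `some (some _)`
      | some (some v) => seg.take d ++ v.data
      | _ => seg.take d ++ tok

-- the enumerate loop + ''.join: every segment but the last gets close = ')'
def pvJoinB (macros : List (String × Option String)) : List (List Char) → List Char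
  | [] => []
  | [seg] => pvProcSeg macros [] seg
  | seg :: rest => pvProcSeg macros [')'] seg ++ pvJoinB macros rest

def macro_expansion_n10x_alt (target_string : String) (macros : List (String × Option String)) : String :=
  String.mk (pvJoinB macros (pvSplitParen target_string.data))

-- ===== PRECONDITION & SPEC =====
def Spec_macro_expansion_n10x (target_string : String) (macros : List (String × Option String)) (out : String) : Prop := out = macro_expansion_n10x_alt target_string macros
instance (target_string : String) (macros : List (String × Option String)) (out : String) : Decidable (Spec_macro_expansion_n10x target_string macros out) := by unfold Spec_macro_expansion_n10x; infer_instance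

-- ===== CLAIM (what is proved, stated in full; the proofs are below) =====
def Claim_equal_macro_expansion_n10x : Prop := ∀ (target_string : String) (macros : List (String × Option String)), Dom_macro_expansion_n10x target_string macros → Spec_macro_expansion_n10x target_string macros (macro_expansion_n10x target_string macros)

-- ===== LEMMAS AND PROOFS =====

-- the macro replacement both programs perform on a token
def pvRepl (macros : List (String × Option String)) (tok : List Char) : List Char :=
  match macros.lookup (String.mk tok) with
  | some (some v) => v.data
  | _ => tok

-- reference expansion: literal characters one at a time, '$' starts a token running to the first ')'
def pvE (macros : List (String × Option String)) : List Char → List Char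
  | [] => []
  | c :: rest =>
    if c = '$' then
      match _h : rest.dropWhile (fun x => x ≠ ')') with
      | [] => pvRepl macros (c :: rest.takeWhile (fun x => x ≠ ')'))
      | _ :: rs => pvRepl macros (c :: rest.takeWhile (fun x => x ≠ ')') ++ [')']) ++ pvE macros rs
    else c :: pvE macros rest
termination_by cs => cs.length
decreasing_by
  · have h2 := List.length_dropWhile_le (fun x => x ≠ ')') rest
    rw [_h] at h2; simp at h2 ⊢; omega
  · simp

theorem pvE_lit (macros : List (String × Option String)) (lit r : List Char)
    (hl : '$' ∉ lit) : pvE macros (lit ++ r) = lit ++ pvE macros r := by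
  induction lit with
  | nil => simp
  | cons c cs ih =>
      have hc : c ≠ '$' := fun h => hl (h ▸ List.mem_cons_self)
      have step : pvE macros ((c :: cs) ++ r) = c :: pvE macros (cs ++ r) := by
        rw [List.cons_append, pvE.eq_def]; simp [hc]
      rw [step, ih (fun h => hl (List.mem_cons_of_mem _ h))]; rfl

theorem pvE_dollar_nil (macros : List (String × Option String)) (rest : List Char)
    (hD : rest.dropWhile (fun x => x ≠ ')') = []) :
    pvE macros ('$' :: rest) = pvRepl macros ('$' :: rest.takeWhile (fun x => x ≠ ')')) := by
  rw [pvE.eq_def]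
  dsimp only
  rw [if_pos rfl]
  split
  · rfl
  · rename_i d rs heq
    rw [hD] at heq
    simp at heq

theorem pvE_dollar_cons (macros : List (String × Option String)) (rest : List Char)
    (d : Char) (rs : List Char) (hD : rest.dropWhile (fun x => x ≠ ')') = d :: rs) :
    pvE macros ('$' :: rest)
      = pvRepl macros ('$' :: rest.takeWhile (fun x => x ≠ ')') ++ [')']) ++ pvE macros rs := by
  rw [pvE.eq_def]
  dsimp only
  rw [if_pos rfl]
  split
  · rename_i heq
    rw [hD] at heq
    simp at heq
  · rename_i d' rs' heq
    rw [hD] at heq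
    cases heq
    rfl

theorem pvScanA_eq (c : Char) (s : List Char) (em : Nat) :
    pvScanA c s em = em + ((s.drop em).takeWhile (fun x => x ≠ c)).length := by
  induction em using pvScanA.induct c s with
  | case1 x h heq =>
      rw [pvScanA, List.drop_eq_getElem_cons h]
      simp [h, heq]
  | case2 x h heq ih =>
      rw [pvScanA, List.drop_eq_getElem_cons h]
      simp only [dif_pos h, if_neg heq, List.takeWhile_cons, ih]
      simp [heq]; omega
  | case3 x h =>
      rw [pvScanA]
      have : s.drop x = [] := List.drop_eq_nil_of_le (by omega)
      simp [h, this]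

-- head of a non-nil dropWhile fails the predicate
theorem pvDropWhile_head {p : Char → Bool} {l : List Char} {x : Char} {xs : List Char}
    (h : l.dropWhile p = x :: xs) : p x = false := by
  induction l with
  | nil => simp at h
  | cons a as ih =>
      rw [List.dropWhile_cons] at h
      by_cases hp : p a
      · exact ih (by simpa [hp] using h)
      · simp [hp] at h; simp [← h.1]; simpa using hp

theorem pvDrop_takeWhile (l : List Char) (p : Char → Bool) :
    l.drop (l.takeWhile p).length = l.dropWhile p := by
  calc l.drop (l.takeWhile p).length
      = (l.takeWhile p ++ l.dropWhile p).drop (l.takeWhile p).length := by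
        rw [List.takeWhile_append_dropWhile]
    _ = l.dropWhile p := List.drop_left

theorem pvTake_takeWhile (l : List Char) (p : Char → Bool) :
    l.take (l.takeWhile p).length = l.takeWhile p := by
  calc l.take (l.takeWhile p).length
      = (l.takeWhile p ++ l.dropWhile p).take (l.takeWhile p).length := by
        rw [List.takeWhile_append_dropWhile]
    _ = l.takeWhile p := List.take_left

theorem pv_core_eq (s : List Char) (macros : List (String × Option String)) :
    ∀ i out, macro_expansion_n10x_core s macros i out = out ++ pvE macros (s.drop i) := by
  suffices H : ∀ n i out, s.length + 1 - i ≤ n →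
      macro_expansion_n10x_core s macros i out = out ++ pvE macros (s.drop i) from
    fun i out => H _ i out le_rfl
  intro n
  induction n with
  | zero =>
      intro i out hn
      have hi : ¬ i < s.length := by omega
      rw [macro_expansion_n10x_core]
      simp [hi, List.drop_eq_nil_of_le (show s.length ≤ i by omega), pvE]
  | succ n ih =>
      intro i out hn
      rw [macro_expansion_n10x_core]
      by_cases hi : i < s.length
      · simp only [dif_pos hi]
        by_cases hd : s[i] = '$'
        · simp only [dif_pos hd]
          set rest := s.drop (i + 1) with hrest
          set B := rest.takeWhile (fun x => x ≠ ')') with hB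
          have hdropi : s.drop i = s[i] :: rest := List.drop_eq_getElem_cons hi
          have hem : pvScanA ')' s i = i + 1 + B.length := by
            rw [pvScanA_eq, hdropi, List.takeWhile_cons, hd, ← hB]
            simp
            omega
          have hkey : (s.drop i).take (pvScanA ')' s i + 1 - i)
              = s[i] :: rest.take (B.length + 1) := by
            rw [hdropi, hem]
            have : i + 1 + B.length + 1 - i = B.length + 1 + 1 := by omega
            rw [this, List.take_cons]
            · norm_num
            · omega
          have hsplit : rest = B ++ rest.dropWhile (fun x => x ≠ ')') :=
            (List.takeWhile_append_dropWhile).symm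
          have hdropem : s.drop (pvScanA ')' s i) = rest.dropWhile (fun x => x ≠ ')') := by
            rw [hem, show i + 1 + B.length = (i + 1) + B.length from rfl,
              ← List.drop_drop, ← hrest, hB, pvDrop_takeWhile]
          -- RHS token shape
          rcases hD : rest.dropWhile (fun x => x ≠ ')') with _ | ⟨d, rs⟩
          · -- no closing ')': em = length, key = '$' :: B, loop ends next step
            have hBrest : B = rest := by
              conv_rhs => rw [hsplit, hD]
              simp
            have hlen : pvScanA ')' s i = s.length := by
              rw [hem, hBrest, hrest]; simp; omega
            have hkey2 : (s.drop i).take (pvScanA ')' s i + 1 - i) = s[i] :: B := by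
              rw [hkey, hBrest, List.take_of_length_le (by omega)]
            rw [hkey2, ih (pvScanA ')' s i + 1) _ (by rw [hlen]; omega),
              List.drop_eq_nil_of_le (show s.length ≤ pvScanA ')' s i + 1 by rw [hlen]; omega),
              hdropi, hd, pvE_dollar_nil macros rest hD, ← hB]
            simp [pvRepl, pvE]
          · have hdpar : d = ')' := by
              have := pvDropWhile_head hD
              simpa using this
            have hkey2 : (s.drop i).take (pvScanA ')' s i + 1 - i) = s[i] :: (B ++ [')']) := by
              rw [hkey, hsplit, hD, List.take_append]
              simp [hdpar]
            have hemlt : pvScanA ')' s i < s.length := by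
              by_contra hcon
              have : s.drop (pvScanA ')' s i) = [] := List.drop_eq_nil_of_le (by omega)
              rw [hdropem, hD] at this; simp at this
            have hdropem1 : s.drop (pvScanA ')' s i + 1) = rs := by
              have h1 : List.drop 1 (List.drop (pvScanA ')' s i) s) = rs := by
                rw [hdropem, hD]; rfl
              rw [List.drop_drop] at h1
              simpa [Nat.add_comm] using h1
            rw [hkey2, ih (pvScanA ')' s i + 1) _ (by have := pvScanA_ge ')' s i; omega),
              hdropem1, hdropi, hd, pvE_dollar_cons macros rest d rs hD, ← hB]
            simp [pvRepl, List.append_assoc]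
        · simp only [dif_neg hd]
          set L := (s.drop i).takeWhile (fun x => x ≠ '$') with hL
          have hem : pvScanA '$' s i = i + L.length := pvScanA_eq '$' s i
          have hchunk : (s.drop i).take (pvScanA '$' s i - i) = L := by
            rw [hem, Nat.add_sub_cancel_left, hL, pvTake_takeWhile]
          have hdropem : s.drop (pvScanA '$' s i) = (s.drop i).dropWhile (fun x => x ≠ '$') := by
            rw [hem, ← List.drop_drop, hL, pvDrop_takeWhile]
          have hge : i + 1 ≤ pvScanA '$' s i := pvScanA_gt '$' s i hi hd
          rw [hchunk, ih (pvScanA '$' s i) _ (by omega), hdropem]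
          have hnotin : '$' ∉ L := by
            intro hmem
            have := List.mem_takeWhile_imp hmem
            simp at this
          conv_rhs => rw [show s.drop i = L ++ (s.drop i).dropWhile (fun x => x ≠ '$') from
            (List.takeWhile_append_dropWhile).symm]
          rw [pvE_lit _ _ _ hnotin, List.append_assoc]
      · have : s.length ≤ i := by omega
        simp [hi, List.drop_eq_nil_of_le this, pvE]

theorem pvE_char (macros : List (String × Option String)) (c : Char) (rest : List Char)
    (hc : c ≠ '$') : pvE macros (c :: rest) = c :: pvE macros rest := by
  rw [pvE.eq_def]
  dsimp only
  rw [if_neg hc]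

theorem pvSplitParen_ne_nil (l : List Char) : pvSplitParen l ≠ [] := by
  rw [pvSplitParen.eq_def]
  split <;> simp

theorem pvIdx_facts {l : List Char} {d0 : Nat} (hI : l.idxOf? '$' = some d0) :
    l.drop d0 = '$' :: l.drop (d0 + 1) ∧ '$' ∉ l.take d0 := by
  obtain ⟨hlt, hget, hbefore⟩ := List.idxOf?_eq_some_iff.mp hI
  constructor
  · rw [List.drop_eq_getElem_cons hlt, hget]
  · intro hmem
    obtain ⟨j, hj, hjv⟩ := List.mem_iff_getElem.mp hmem
    have hj' : j < d0 := by
      have := hj; simp [List.length_take] at this; omega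
    exact hbefore j hj' (by rw [← hjv, List.getElem_take])

theorem pvNoParen_mem {l : List Char} (h : l.dropWhile (fun x => x ≠ ')') = []) :
    ∀ x ∈ l, x ≠ ')' := by
  intro x hx
  have := (List.dropWhile_eq_nil_iff).mp h x hx
  simpa using this

theorem pv_join_eq (macros : List (String × Option String)) :
    ∀ cs, pvJoinB macros (pvSplitParen cs) = pvE macros cs := by
  suffices H : ∀ n cs, List.length cs ≤ n → pvJoinB macros (pvSplitParen cs) = pvE macros cs from
    fun cs => H cs.length cs le_rfl
  intro n
  induction n with
  | zero =>
      intro cs hlen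
      have : cs = [] := List.eq_nil_of_length_eq_zero (by omega)
      subst this
      simp [pvSplitParen, pvJoinB, pvProcSeg, pvE]
  | succ n ih =>
      intro cs hlen
      rw [pvSplitParen.eq_def]
      split
      · -- no ')' in cs : a single, unterminated segment
        rename_i heq
        have hpre : cs.takeWhile (fun x => x ≠ ')') = cs := by
          conv_rhs => rw [← List.takeWhile_append_dropWhile (p := fun x => x ≠ ')') (l := cs)]
          rw [heq, List.append_nil]
        rw [hpre]
        show pvProcSeg macros [] cs = pvE macros cs
        unfold pvProcSeg
        split
        · -- no '$' either: identity
          rename_i hI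
          have hnot : '$' ∉ cs := List.idxOf?_eq_none_iff.mp hI
          have := pvE_lit macros cs [] hnot
          simp only [List.append_nil] at this
          rw [this]
          simp [pvE]
        · rename_i d0 hI
          obtain ⟨hdrop, hnot⟩ := pvIdx_facts hI
          have htail : (cs.drop (d0 + 1)).dropWhile (fun x => x ≠ ')') = [] := by
            rw [List.dropWhile_eq_nil_iff]
            intro x hx
            simpa using pvNoParen_mem heq x (List.drop_subset _ _ hx)
          have htake : (cs.drop (d0 + 1)).takeWhile (fun x => x ≠ ')') = cs.drop (d0 + 1) := by
            conv_rhs => rw [← List.takeWhile_append_dropWhile (p := fun x => x ≠ ')')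
              (l := cs.drop (d0 + 1))]
            rw [htail, List.append_nil]
          conv_rhs => rw [← List.take_append_drop d0 cs]
          rw [pvE_lit macros _ _ hnot, hdrop, pvE_dollar_nil macros _ htail, htake]
          simp only [pvRepl, List.append_nil]
          cases hL : List.lookup (String.mk ('$' :: List.drop (d0 + 1) cs)) macros with
          | none => simp
          | some o => cases o <;> simp
      · -- cs = pre ++ ')' :: rs
        rename_i d rs heq
        have hdpar : d = ')' := by simpa using pvDropWhile_head heq
        subst hdpar
        set pre := cs.takeWhile (fun x => x ≠ ')') with hpreDef
        have hcs : pre ++ ')' :: rs = cs := by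
          conv_rhs => rw [← List.takeWhile_append_dropWhile (p := fun x => x ≠ ')') (l := cs)]
          rw [heq]
        have hrs : rs.length ≤ n := by
          have h1 := List.length_dropWhile_le (fun x => x ≠ ')') cs
          rw [heq] at h1; simp at h1; omega
        have hprePar : ∀ x ∈ pre, x ≠ ')' := by
          intro x hx
          simpa using List.mem_takeWhile_imp hx
        obtain ⟨a, as, hsp⟩ : ∃ a as, pvSplitParen rs = a :: as := by
          cases hspc : pvSplitParen rs with
          | nil => exact absurd hspc (pvSplitParen_ne_nil rs)
          | cons a as => exact ⟨a, as, rfl⟩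
        rw [hsp]
        show pvProcSeg macros [')'] pre ++ pvJoinB macros (a :: as) = pvE macros cs
        rw [← hsp, ih rs hrs, ← hcs]
        unfold pvProcSeg
        split
        · -- no '$' in the segment: it passes through with its ')'
          rename_i hI
          have hnot : '$' ∉ pre := List.idxOf?_eq_none_iff.mp hI
          rw [pvE_lit macros _ _ hnot, pvE_char macros ')' rs (by decide)]
          simp
        · rename_i d0 hI
          obtain ⟨hdrop, hnot⟩ := pvIdx_facts hI
          have htail : ∀ x ∈ pre.drop (d0 + 1), x ≠ ')' :=
            fun x hx => hprePar x (List.drop_subset _ _ hx)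
          conv_rhs => rw [show pre ++ ')' :: rs = pre.take d0 ++ (pre.drop d0 ++ ')' :: rs) by
            rw [← List.append_assoc, List.take_append_drop]]
          rw [pvE_lit macros _ _ hnot, hdrop]
          have hE := pvE_dollar_cons macros (pre.drop (d0 + 1) ++ ')' :: rs) ')' rs
            (by rw [List.dropWhile_append_of_pos (by intro x hx; simpa using htail x hx)]
                simp)
          rw [← List.cons_append] at hE
          rw [hE]
          rw [List.takeWhile_append_of_pos (by intro x hx; simpa using htail x hx)]
          simp [pvRepl]
          cases hL : List.lookup (String.mk ('$' :: (List.drop (d0 + 1) pre ++ [')']))) macros with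
          | none => simp
          | some o => cases o <;> simp

-- ===== VERDICT (by name: the statement is the Claim_ definition above) =====
theorem macro_expansion_n10x_spec : Claim_equal_macro_expansion_n10x := by
  intro ts macros _
  unfold Spec_macro_expansion_n10x macro_expansion_n10x macro_expansion_n10x_alt
  rw [pv_core_eq, pv_join_eq]
  simp
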